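-- pv_equiv track=rewrite | github.com/dogewzy/checkio | escher/The Secret Room.py | secret_room
-- ===== SOURCE A (Python) =====
-- def secret_room(number):
--     # 寻找递归的感觉
--     table = {
--         1: ['zero', 'one', 'two', 'three', 'four', 'five', 'six', 'seven', 'eight', 'nine', 'ten', 'eleven', 'twelve',
--             'thirteen', 'fourteen', 'fifteen', 'sixteen', 'seventeen', 'eighteen', 'nineteen'],
--         20: ['twenty', 'thirty', 'forty', 'fifty', 'sixty', 'seventy', 'eighty', 'ninety']
--     }
--
--     def get_name(num):
--         if num == 0:
--             return ''
--         if num < 20: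
--             return table[1][num]
--         elif num < 100:
--             return ' '.join([table[20][int(num / 10) - 2],  get_name(num - int(num/10)*10)]).rstrip()
--         elif num < 1000:
--             return ' '.join([get_name(int(num / 100)), 'hundred', get_name(num - int(num/100)*100)]).rstrip()
--         else:
--             return 'one thousand'
--
--     number_list = sorted([get_name(i) for i in range(1, number + 1)])
--     return number_list.index(get_name(number)) + 1
-- ===== SOURCE B (Python) =====
-- # Rank of the name of `number` among the sorted names of 1..number equals
-- # 1 + (how many of those names compare lexicographically smaller).
-- # Names of all i >= 1000 are 'one thousand', so only i <= 999 can contribute: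
-- # one bounded counting pass -- no list of names, no sort.
--
-- _ONES = ['', 'one', 'two', 'three', 'four', 'five', 'six', 'seven', 'eight',
--          'nine', 'ten', 'eleven', 'twelve', 'thirteen', 'fourteen', 'fifteen',
--          'sixteen', 'seventeen', 'eighteen', 'nineteen']
-- _TENS = ['twenty', 'thirty', 'forty', 'fifty', 'sixty', 'seventy', 'eighty', 'ninety']
--
--
-- def _name(num):
--     if num >= 1000:
--         return 'one thousand'
--     parts = []
--     h, r = divmod(num, 100)
--     if h:
--         parts.append(_ONES[h])
--         parts.append('hundred')
--     if r >= 20: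
--         parts.append(_TENS[r // 10 - 2])
--         r = r % 10
--     if r:
--         parts.append(_ONES[r])
--     return ' '.join(parts)
--
--
-- def secret_room(number):
--     if number < 1:
--         raise ValueError("number must be a positive integer")
--     target = _name(number)
--     count = 0
--     for i in range(1, min(number, 999) + 1):
--         if _name(i) < target:
--             count += 1
--     return count + 1
-- ===== Notes on version B (the rewrite author's own statement) =====
-- stated objective: faster
-- what changed: B ranks the name by counting, in one bounded pass over at most 999 candidates, how many names compare lexicographically smaller than the target, instead of building the full list of number names, sorting it and searching for the target's index.
import Mathlib
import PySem

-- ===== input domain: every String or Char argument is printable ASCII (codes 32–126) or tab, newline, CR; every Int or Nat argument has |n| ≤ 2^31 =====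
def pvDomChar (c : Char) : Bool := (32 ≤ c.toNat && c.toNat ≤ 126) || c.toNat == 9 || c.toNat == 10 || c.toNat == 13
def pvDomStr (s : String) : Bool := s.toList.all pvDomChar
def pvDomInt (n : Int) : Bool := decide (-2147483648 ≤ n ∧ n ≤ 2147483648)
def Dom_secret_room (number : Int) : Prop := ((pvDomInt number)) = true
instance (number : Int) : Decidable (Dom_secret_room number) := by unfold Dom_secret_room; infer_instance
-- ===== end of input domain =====

-- B replaces A's build-all-names-then-sort-then-index by one bounded counting pass over
-- the at most 999 candidates whose names can compare smaller than the target — no list, no sort.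


-- ===== PORT A =====
-- table[1] and table[20] of A's literal dict:
def pvTable1 : List String :=
  ["zero", "one", "two", "three", "four", "five", "six", "seven", "eight", "nine", "ten",
   "eleven", "twelve", "thirteen", "fourteen", "fifteen", "sixteen", "seventeen", "eighteen", "nineteen"]
def pvTable20 : List String :=
  ["twenty", "thirty", "forty", "fifty", "sixty", "seventy", "eighty", "ninety"]

-- A's nested helper get_name, ported with a fuel parameter so the recursion is structural
-- (depth ≤ 3 on every input; fuel 3 is never exhausted). table[...][idx] is pyGetD (negative
-- indices wrap; where Python raises IndexError — num < -20, outside Pre_ — it yields "").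
-- int(num/10) / int(num/100) equal floor division on the nonnegative num reaching those branches.
def get_nameF : Nat → Int → String
  | 0, _ => ""
  | fuel + 1, num =>
    if num == 0 then ""
    else if num < 20 then PySem.List.pyGetD pvTable1 num ""
    else if num < 100 then
      PySem.Str.rstrip (PySem.Str.join " "
        [PySem.List.pyGetD pvTable20 (PySem.Int.floordiv num 10 - 2) "",
         get_nameF fuel (num - PySem.Int.floordiv num 10 * 10)])
    else if num < 1000 then
      PySem.Str.rstrip (PySem.Str.join " "
        [get_nameF fuel (PySem.Int.floordiv num 100), "hundred",
         get_nameF fuel (num - PySem.Int.floordiv num 100 * 100)])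
    else "one thousand"

def get_name (num : Int) : String := get_nameF 3 num

-- number_list.index(...) raises ValueError when the name is absent (only for number < 1,
-- excluded by Pre_); the none branch returns 0 there.
-- Python's library sorted(list_of_str) is ported as the library stable merge sort on the
-- same ≤ order (identical output: a stable ≤-sort of strings is unique).
def secret_room (number : Int) : Int :=
  let number_list := ((PySem.List.pyRange 1 (number + 1) 1).map get_name).mergeSort
    (fun a b => decide (a ≤ b))
  match PySem.List.index? number_list (get_name number) with
  | some k => (k : Int) + 1
  | none => 0

-- ===== PORT B =====
def pvOnes : List String :=
  ["", "one", "two", "three", "four", "five", "six", "seven", "eight", "nine", "ten",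
   "eleven", "twelve", "thirteen", "fourteen", "fifteen", "sixteen", "seventeen", "eighteen", "nineteen"]
def pvTens : List String :=
  ["twenty", "thirty", "forty", "fifty", "sixty", "seventy", "eighty", "ninety"]

-- Source B's _name: divmod decomposition, appending word parts. _ONES[h]/_TENS[...] is pyGetD.
def nameB (num : Int) : String :=
  if 1000 ≤ num then "one thousand"
  else
    let h := PySem.Int.floordiv num 100
    let r := PySem.Int.mod num 100
    let parts1 := if h ≠ 0 then [PySem.List.pyGetD pvOnes h "", "hundred"] else []
    let parts2 := if 20 ≤ r then parts1 ++ [PySem.List.pyGetD pvTens (PySem.Int.floordiv r 10 - 2) ""] else parts1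
    let r2 := if 20 ≤ r then PySem.Int.mod r 10 else r
    let parts3 := if r2 ≠ 0 then parts2 ++ [PySem.List.pyGetD pvOnes r2 ""] else parts2
    PySem.Str.join " " parts3

-- Source B raises ValueError for number < 1 (as A does; outside Pre_); the port returns 0 there.
def secret_room_alt (number : Int) : Int :=
  if number < 1 then 0
  else
    let target := nameB number
    let count := (PySem.List.pyRange 1 (min number 999 + 1) 1).foldl
      (fun acc i => if nameB i < target then acc + 1 else acc) (0 : Int)
    count + 1

-- ===== PRECONDITION & SPEC =====
-- A raises for number < 1 (the name list is empty, so .index raises ValueError for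
-- -20 ≤ number ≤ 0, and get_name raises IndexError below -20): exactly those inputs are excluded.
def Pre_secret_room (number : Int) : Prop := 1 ≤ number
instance (number : Int) : Decidable (Pre_secret_room number) := by unfold Pre_secret_room; infer_instance
def pvWitness_secret_room : Int := 5

def Spec_secret_room (number : Int) (out : Int) : Prop := out = secret_room_alt number
instance (number : Int) (out : Int) : Decidable (Spec_secret_room number out) := by unfold Spec_secret_room; infer_instance

-- ===== CLAIM (what is proved, stated in full; the proofs are below) =====
def Claim_equal_secret_room : Prop := ∀ (number : Int), Dom_secret_room number → Pre_secret_room number → Spec_secret_room number (secret_room number)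

-- ===== LEMMAS AND PROOFS =====

-- ---- arithmetic helpers for Python's floor division / modulus (positive divisor) ----
lemma fdiv100 (h r : Int) (hr : 0 ≤ r) (hr99 : r ≤ 99) :
    PySem.Int.floordiv (100 * h + r) 100 = h := by
  simp [PySem.Int.floordiv, Int.fdiv_eq_ediv]
  omega

lemma fmod100 (h r : Int) (hr : 0 ≤ r) (hr99 : r ≤ 99) :
    PySem.Int.mod (100 * h + r) 100 = r := by
  simp [PySem.Int.mod, Int.fmod_eq_emod]
  omega

lemma fdiv100_small (r : Int) (hr : 0 ≤ r) (hr99 : r ≤ 99) :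
    PySem.Int.floordiv r 100 = 0 := by
  simp [PySem.Int.floordiv, Int.fdiv_eq_ediv]
  omega

lemma fmod100_small (r : Int) (hr : 0 ≤ r) (hr99 : r ≤ 99) :
    PySem.Int.mod r 100 = r := by
  simp [PySem.Int.mod, Int.fmod_eq_emod]
  omega

-- ---- fuel adequacy for A's get_name (depth of recursion ≤ its numeric tier) ----
lemma get_nameF_fuel_one (m : Int) (h : m < 20) (f : Nat) :
    get_nameF (f + 1) m = get_nameF 1 m := by
  cases f with
  | zero => rfl
  | succ f => unfold get_nameF; split_ifs <;> rfl

lemma get_nameF_fuel_two (m : Int) (h : m < 100) (f : Nat) :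
    get_nameF (f + 2) m = get_nameF 2 m := by
  unfold get_nameF
  split_ifs with h1 h2
  · rfl
  · rfl
  · have hq : PySem.Int.floordiv m 10 = m / 10 := by
      simp [PySem.Int.floordiv, Int.fdiv_eq_ediv]
    have hb : m - PySem.Int.floordiv m 10 * 10 < 20 := by rw [hq]; omega
    rw [get_nameF_fuel_one _ hb f]

-- ---- the two name functions agree on 0..99 (kernel evaluation), plus shape facts ----
set_option maxRecDepth 100000 in
lemma small_agree : ∀ n ∈ List.range 100, get_name (n : Int) = nameB (n : Int) := by decide

set_option maxRecDepth 100000 in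
set_option maxHeartbeats 1000000 in
lemma small_shape : ∀ n ∈ List.range 100, n ≠ 0 →
    (nameB (n : Int) ≠ "" ∧ PySem.Str.rstrip (nameB (n : Int)) = nameB (n : Int)) := by decide

set_option maxRecDepth 100000 in
lemma small_ones : ∀ n ∈ List.range 10, n ≠ 0 →
    nameB (n : Int) = PySem.List.pyGetD pvOnes (n : Int) "" := by decide

lemma small_agree' (i : Int) (h1 : 0 ≤ i) (h2 : i ≤ 99) : get_name i = nameB i := by
  have h := small_agree i.toNat (by simp [List.mem_range]; omega)
  rwa [Int.toNat_of_nonneg h1] at h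

lemma small_shape' (i : Int) (h1 : 1 ≤ i) (h2 : i ≤ 99) :
    nameB i ≠ "" ∧ PySem.Str.rstrip (nameB i) = nameB i := by
  have h := small_shape i.toNat (by simp [List.mem_range]; omega) (by omega)
  rwa [Int.toNat_of_nonneg (by omega)] at h

lemma small_ones' (i : Int) (h1 : 1 ≤ i) (h2 : i ≤ 9) :
    nameB i = PySem.List.pyGetD pvOnes i "" := by
  have h := small_ones i.toNat (by simp [List.mem_range]; omega) (by omega)
  rwa [Int.toNat_of_nonneg (by omega)] at h

-- ---- string glue: rstrip of a word-terminated join ----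
lemma rstrip_append (w s : List Char)
    (hfix : PySem.Chars.rstrip s = s) (hne : s ≠ []) :
    PySem.Chars.rstrip (w ++ s) = w ++ s := by
  unfold PySem.Chars.rstrip at *
  have hdw : List.dropWhile PySem.Chars.isspace s.reverse = s.reverse := by
    have := congrArg List.reverse hfix
    simpa using this
  rw [List.reverse_append, List.dropWhile_append, hdw]
  have hie : s.reverse.isEmpty = false := by
    simp [hne]
  rw [hie]
  simp

lemma rstrip_str_append (w s : String)
    (hfix : PySem.Str.rstrip s = s) (hne : s ≠ "") :
    PySem.Str.rstrip (w ++ s) = w ++ s := by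
  rw [← String.toList_inj, PySem.Str.toList_rstrip, String.toList_append]
  apply rstrip_append
  · rw [← PySem.Str.toList_rstrip, hfix]
  · intro hc
    apply hne
    rw [← String.toList_inj]
    simpa using hc

-- the decisive join/rstrip bridge: target name built from a non-empty parts tail
lemma join_glue (O S : String) (T : List String)
    (hS : S = PySem.Str.join " " T)
    (hfix : PySem.Str.rstrip S = S) (hne : S ≠ "") :
    PySem.Str.rstrip (PySem.Str.join " " [O, "hundred", S]) =
      PySem.Str.join " " ([O, "hundred"] ++ T) := by
  cases T with
  | nil => simp [PySem.Str.join, PySem.Chars.join_nil] at hS; exact absurd hS hne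
  | cons t0 T' =>
    have hexp : PySem.Str.join " " ([O, "hundred"] ++ (t0 :: T')) =
        O ++ " " ++ "hundred" ++ " " ++ PySem.Str.join " " (t0 :: T') := by
      rw [← String.toList_inj]
      simp only [PySem.Str.toList_join, List.cons_append, List.nil_append, List.map_cons,
        PySem.Chars.join_cons_cons, String.toList_append]
      simp
    have hexp3 : PySem.Str.join " " [O, "hundred", S] =
        O ++ " " ++ "hundred" ++ " " ++ S := by
      rw [← String.toList_inj]
      simp only [PySem.Str.toList_join, List.map_cons, List.map_nil,
        PySem.Chars.join_cons_cons, PySem.Chars.join_singleton, String.toList_append]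
      simp
    rw [hexp3, hexp, ← hS]
    have := rstrip_str_append (O ++ " " ++ "hundred" ++ " ") S hfix hne
    simpa [String.append_assoc] using this

-- the r = 0 case: a trailing separator and empty last part get stripped
lemma rstrip_hundred_space (O : String) :
    PySem.Str.rstrip (PySem.Str.join " " [O, "hundred", ""]) =
      PySem.Str.join " " [O, "hundred"] := by
  rw [← String.toList_inj, PySem.Str.toList_rstrip]
  simp only [PySem.Str.toList_join, List.map_cons, List.map_nil,
    PySem.Chars.join_cons_cons, PySem.Chars.join_singleton]
  unfold PySem.Chars.rstrip
  simp [List.dropWhile, PySem.Chars.isspace]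

-- one unfolding step of A's helper in its hundreds branch (variable fuel keeps the
-- recursive calls folded)
lemma get_nameF_hundreds (f : Nat) (num : Int) (hc1 : 100 ≤ num) (hc2 : num < 1000) :
    get_nameF (f + 1) num = PySem.Str.rstrip (PySem.Str.join " "
      [get_nameF f (PySem.Int.floordiv num 100), "hundred",
       get_nameF f (num - PySem.Int.floordiv num 100 * 100)]) := by
  simp only [get_nameF]
  rw [if_neg (show ¬ ((num == 0) = true) by simp; omega),
      if_neg (show ¬ (num < 20) by omega),
      if_neg (show ¬ (num < 100) by omega),
      if_pos (show num < 1000 by omega)]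

-- ---- agreement on the hundreds 100..999 ----
lemma names_agree_hundreds (h r : Int) (hh : 1 ≤ h) (hh9 : h ≤ 9)
    (hr : 0 ≤ r) (hr99 : r ≤ 99) :
    get_name (100 * h + r) = nameB (100 * h + r) := by
  have hfd : PySem.Int.floordiv (100 * h + r) 100 = h := fdiv100 h r hr hr99
  have hfm : PySem.Int.mod (100 * h + r) 100 = r := fmod100 h r hr hr99
  have hfd0 : PySem.Int.floordiv r 100 = 0 := fdiv100_small r hr hr99
  have hfm0 : PySem.Int.mod r 100 = r := fmod100_small r hr hr99
  have harg : 100 * h + r - h * 100 = r := by ring_nf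
  -- A's hundreds branch, with enough fuel for the small recursive calls
  have hA : get_name (100 * h + r) = PySem.Str.rstrip (PySem.Str.join " "
      [get_nameF 2 h, "hundred", get_nameF 2 r]) := by
    rw [show get_name (100 * h + r) = get_nameF (2 + 1) (100 * h + r) from rfl,
        get_nameF_hundreds 2 (100 * h + r) (by omega) (by omega), hfd, harg]
  have hXh : get_nameF 2 h = PySem.List.pyGetD pvOnes h "" := by
    have e1 : get_nameF 3 h = get_nameF 2 h := get_nameF_fuel_two h (by omega) 1
    rw [← e1]
    calc get_nameF 3 h = get_name h := rfl
      _ = nameB h := small_agree' h (by omega) (by omega)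
      _ = PySem.List.pyGetD pvOnes h "" := small_ones' h hh hh9
  have hXr : get_nameF 2 r = nameB r := by
    have e1 : get_nameF 3 r = get_nameF 2 r := get_nameF_fuel_two r (by omega) 1
    rw [← e1]
    exact small_agree' r hr hr99
  rw [hA, hXh, hXr]
  have hnb : nameB (100 * h + r) = PySem.Str.join " "
      (((if (h : Int) ≠ 0 then [PySem.List.pyGetD pvOnes h "", "hundred"] else []) ++
        (if 20 ≤ r then [PySem.List.pyGetD pvTens (PySem.Int.floordiv r 10 - 2) ""] else [])) ++
       (if (if 20 ≤ r then PySem.Int.mod r 10 else r) ≠ 0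
          then [PySem.List.pyGetD pvOnes (if 20 ≤ r then PySem.Int.mod r 10 else r) ""] else [])) := by
    unfold nameB
    rw [if_neg (show ¬ (1000 ≤ 100 * h + r) by omega)]
    simp only [hfd, hfm]
    split_ifs <;> simp
  have hnr : nameB r = PySem.Str.join " "
      (((if (0 : Int) ≠ 0 then [PySem.List.pyGetD pvOnes 0 "", "hundred"] else []) ++
        (if 20 ≤ r then [PySem.List.pyGetD pvTens (PySem.Int.floordiv r 10 - 2) ""] else [])) ++
       (if (if 20 ≤ r then PySem.Int.mod r 10 else r) ≠ 0
          then [PySem.List.pyGetD pvOnes (if 20 ≤ r then PySem.Int.mod r 10 else r) ""] else [])) := by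
    unfold nameB
    rw [if_neg (show ¬ (1000 ≤ r) by omega)]
    simp only [hfd0, hfm0]
    split_ifs <;> simp
  rw [hnb]
  rw [if_pos (show (h : Int) ≠ 0 by omega), if_neg (show ¬ ((0 : Int) ≠ 0) by omega)] at *
  simp only [List.nil_append] at hnr
  by_cases h20 : (20 : Int) ≤ r
  · simp only [if_pos h20] at *
    by_cases hz : PySem.Int.mod r 10 ≠ 0
    · simp only [if_pos hz] at *
      rcases small_shape' r (by omega) hr99 with ⟨hne, hfix⟩
      exact join_glue _ _ _ hnr hfix hne
    · simp only [if_neg hz] at *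
      rcases small_shape' r (by omega) hr99 with ⟨hne, hfix⟩
      exact join_glue _ _ _ (by simpa using hnr) hfix hne
  · simp only [if_neg h20] at *
    by_cases hz : r ≠ 0
    · simp only [if_pos hz] at *
      rcases small_shape' r (by omega) hr99 with ⟨hne, hfix⟩
      exact join_glue _ _ _ (by simpa using hnr) hfix hne
    · simp only [if_neg hz] at *
      have hr0 : r = 0 := by omega
      subst hr0
      have hnb0 : nameB 0 = "" := by decide
      rw [hnb0]
      simpa using rstrip_hundred_space (PySem.List.pyGetD pvOnes h "")

-- full agreement on 1..999
lemma names_agree (i : Int) (h1 : 1 ≤ i) (h2 : i ≤ 999) : get_name i = nameB i := by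
  by_cases hsm : i ≤ 99
  · exact small_agree' i (by omega) hsm
  · have hrep : i = 100 * (i / 100) + i % 100 := by omega
    rw [hrep]
    exact names_agree_hundreds (i / 100) (i % 100) (by omega) (by omega) (by omega) (by omega)

-- both names are 'one thousand' from 1000 on
lemma get_name_big (i : Int) (h : 1000 ≤ i) : get_name i = "one thousand" := by
  have h0 : ¬ (i == 0) = true := by simp; omega
  simp [get_name, get_nameF, h0, show ¬ i < 20 by omega, show ¬ i < 100 by omega,
        show ¬ i < 1000 by omega]

lemma nameB_big (i : Int) (h : 1000 ≤ i) : nameB i = "one thousand" := by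
  simp [nameB, h]

-- first index of x in a (pairwise-≤) sorted list = number of elements strictly below x
lemma index_sorted_count (M : List String) (x : String)
    (hs : M.Pairwise (· ≤ ·)) (hx : x ∈ M) :
    PySem.List.index? M x = some (M.countP (fun y => decide (y < x))) := by
  induction M with
  | nil => cases hx
  | cons a t ih =>
    rcases List.pairwise_cons.mp hs with ⟨ha, ht⟩
    by_cases hax : a = x
    · subst hax
      rw [PySem.List.index?_cons_self]
      have h0 : (a :: t).countP (fun y => decide (y < a)) = 0 :=
        List.countP_eq_zero.mpr (fun y hy => by
          simp only [decide_eq_true_eq]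
          rcases List.mem_cons.mp hy with rfl | hy'
          · exact lt_irrefl y
          · exact not_lt.mpr (ha y hy'))
      rw [h0]
    · have hxt : x ∈ t := by
        rcases hx with _ | h
        · exact absurd rfl hax
        · assumption
      rw [PySem.List.index?_cons_of_ne t hax, ih ht hxt]
      have hlt : a < x := lt_of_le_of_ne (ha x hxt) hax
      rw [Option.map_some, List.countP_cons]
      rw [if_pos (decide_eq_true hlt)]

-- A's result, as a count over the unsorted range of names
lemma secret_room_eq_count (number : Int) (hp : 1 ≤ number) :
    secret_room number =
      ((PySem.List.pyRange 1 (number + 1) 1).countP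
        (fun i => decide (get_name i < get_name number)) : Int) + 1 := by
  have hperm := List.mergeSort_perm ((PySem.List.pyRange 1 (number + 1) 1).map get_name)
      (fun a b => decide (a ≤ b))
  have hmem : get_name number ∈
      ((PySem.List.pyRange 1 (number + 1) 1).map get_name).mergeSort
        (fun a b => decide (a ≤ b)) := by
    rw [hperm.mem_iff]
    exact List.mem_map_of_mem (by rw [PySem.List.mem_pyRange_one]; omega)
  have hpw : (((PySem.List.pyRange 1 (number + 1) 1).map get_name).mergeSort
      (fun a b => decide (a ≤ b))).Pairwise (· ≤ ·) := by
    have := List.pairwise_mergeSort (le := fun a b : String => decide (a ≤ b))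
      (fun a b c hab hbc => by
        simp only [decide_eq_true_eq] at *
        exact le_trans hab hbc)
      (fun a b => by
        simp only [Bool.or_eq_true, decide_eq_true_eq]
        exact le_total a b)
      ((PySem.List.pyRange 1 (number + 1) 1).map get_name)
    exact this.imp (by simp)
  have hidx := index_sorted_count _ _ hpw hmem
  unfold secret_room
  simp only [hidx]
  rw [hperm.countP_eq, List.countP_map]
  rfl

-- B's result, as the same kind of count over its (truncated) range
lemma secret_room_alt_eq_count (number : Int) (hp : 1 ≤ number) :
    secret_room_alt number =
      ((PySem.List.pyRange 1 (min number 999 + 1) 1).countP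
        (fun i => decide (nameB i < nameB number)) : Int) + 1 := by
  unfold secret_room_alt
  rw [if_neg (by omega)]
  simp only [PySem.List.foldl_ite_add_one]
  omega

-- ===== VERDICT =====
theorem secret_room_spec : Claim_equal_secret_room := by
  intro number _hd hp
  unfold Pre_secret_room at hp
  unfold Spec_secret_room
  rw [secret_room_eq_count number hp, secret_room_alt_eq_count number hp]
  by_cases hbig : number ≤ 999
  · rw [min_eq_left hbig]
    have hc : (PySem.List.pyRange 1 (number + 1) 1).countP
          (fun i => decide (get_name i < get_name number)) =
        (PySem.List.pyRange 1 (number + 1) 1).countP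
          (fun i => decide (nameB i < nameB number)) := by
      apply List.countP_congr
      intro i hi
      rw [PySem.List.mem_pyRange_one] at hi
      simp only [decide_eq_true_eq]
      rw [names_agree i (by omega) (by omega), names_agree number hp hbig]
    rw [hc]
  · rw [min_eq_right (by omega), show (999 : Int) + 1 = 1000 from by norm_num]
    rw [PySem.List.pyRange_one_append 1 1000 (number + 1) (by omega) (by omega),
        List.countP_append]
    have htail : (PySem.List.pyRange 1000 (number + 1) 1).countP
        (fun i => decide (get_name i < get_name number)) = 0 := by
      apply List.countP_eq_zero.mpr
      intro i hi
      rw [PySem.List.mem_pyRange_one] at hi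
      simp only [get_name_big i (by omega), get_name_big number (by omega), decide_eq_true_eq]
      exact lt_irrefl _
    rw [htail, Nat.add_zero]
    have hc : (PySem.List.pyRange 1 1000 1).countP
          (fun i => decide (get_name i < get_name number)) =
        (PySem.List.pyRange 1 1000 1).countP
          (fun i => decide (nameB i < nameB number)) := by
      apply List.countP_congr
      intro i hi
      rw [PySem.List.mem_pyRange_one] at hi
      simp only [decide_eq_true_eq]
      rw [names_agree i (by omega) (by omega), get_name_big number (by omega),
          ← nameB_big number (by omega)]
    rw [hc]
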